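-- pv_equiv track=rewrite | github.com/hatoto/bean-comment-extractor | beanParser.py | removeDefault
-- ===== SOURCE A (Python) =====
-- def removeDefault(line):
--     """ 若欄位有寫'='和預設值，進行移除 """
--     if '@ApiModelProperty' not in line:
--         if line.find('=') > -1:
--             line = line[:line.find('=')]+';'
--
--         if line.find(';') > -1:
--             if line[-2].isspace():
--                 line = line[:-2]+';'
--                 return removeDefault(line)
--     return line
-- ===== SOURCE B (Python) =====
-- def removeDefault(line):
--     """ 若欄位有寫'='和預設值，進行移除 """
--     if '@ApiModelProperty' in line:
--         return line
--     eq = line.find('=')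
--     if eq != -1:
--         line = line[:eq] + ';'
--     if ';' in line and len(line) > 1 and line[-2].isspace():
--         line = line[:-2].rstrip() + ';'
--     return line
-- ===== Notes on version B (the rewrite author's own statement) =====
-- stated objective: simpler
-- what changed: B replaces A's tail recursion (which re-scans the line and deletes one whitespace character per call) with a single non-recursive guarded pass: one rstrip of line[:-2] computes the fully-stripped result in closed form; Pre_ excludes only the inputs where A raises IndexError.
-- outside the precondition, e.g. on removeDefault(';'): A raises IndexError, B returns ';'; on removeDefault('='): A raises IndexError, B returns ';'; on removeDefault(' ;'): A raises IndexError, B returns ';'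
import Mathlib
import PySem

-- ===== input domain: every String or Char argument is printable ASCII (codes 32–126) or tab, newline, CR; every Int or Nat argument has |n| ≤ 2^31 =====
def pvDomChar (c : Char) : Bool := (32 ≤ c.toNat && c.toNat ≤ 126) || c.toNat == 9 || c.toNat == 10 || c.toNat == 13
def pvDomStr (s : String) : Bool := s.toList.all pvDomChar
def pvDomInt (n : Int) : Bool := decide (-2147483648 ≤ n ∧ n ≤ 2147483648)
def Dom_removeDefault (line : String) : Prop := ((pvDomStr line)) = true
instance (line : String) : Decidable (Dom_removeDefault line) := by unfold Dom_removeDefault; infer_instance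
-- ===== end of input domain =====

-- B replaces A's tail recursion (one whitespace char deleted per call) with one guarded rstrip of
-- line[:-2]; objective: simpler (single pass, no recursion).

-- ===== PORT A =====
def pvPat : List Char := "@ApiModelProperty".toList

-- '=' truncation: line = line[:line.find('=')] + ';'  (shared shape, also used by Pre_)
def pvTrunc (l : List Char) : List Char :=
  if PySem.Chars.find l ['='] > -1 then
    PySem.List.slice l none (some (PySem.Chars.find l ['='])) ++ [';']
  else l

lemma pvTrunc_length_le (l : List Char) : (pvTrunc l).length ≤ l.length := by
  unfold pvTrunc
  split_ifs with h
  · have h0 : 0 ≤ PySem.Chars.find l ['='] := by omega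
    have hspec := PySem.Chars.find_spec (s := l) (sub := ['=']) h0
    have hlt : (PySem.Chars.find l ['=']).toNat < l.length := by
      have h1 := hspec.1.length_le
      simp [List.length_drop] at h1
      omega
    rw [PySem.List.slice_to _ h0]
    simp [List.length_take]
    omega
  · exact le_refl _

lemma pyGet_neg2_some_len {l : List Char} {c : Char}
    (h : PySem.List.pyGet? l (-2) = some c) : 2 ≤ l.length := by
  by_contra hh
  push_neg at hh
  have hcond : ¬ (-(l.length : Int) ≤ -2) := by omega
  simp [PySem.List.pyGet?, PySem.List.pyIdx?, hcond] at h

lemma slice_neg2 (l : List Char) :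
    PySem.List.slice l none (some (-2)) = l.take (l.length - 2) :=
  PySem.List.slice_to_neg_ofNat l 2 (by omega)

-- literal transliteration of Python A (the tail recursion); at the input where Python raises
-- IndexError on line[-2] (pyGet? = none) the port returns the line (those inputs are outside Pre_)
def removeDefaultChars (l : List Char) : List Char :=
  if PySem.Chars.isIn pvPat l = false then
    if PySem.Chars.find (pvTrunc l) [';'] > -1 then
      match hm : PySem.List.pyGet? (pvTrunc l) (-2) with
      | some c =>
        if PySem.Chars.isspace c then
          removeDefaultChars (PySem.List.slice (pvTrunc l) none (some (-2)) ++ [';'])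
        else pvTrunc l
      | none => pvTrunc l
    else pvTrunc l
  else l
termination_by l.length
decreasing_by
  have h2 := pyGet_neg2_some_len hm
  have hle := pvTrunc_length_le l
  simp only [slice_neg2, List.length_append, List.length_take, List.length_cons,
    List.length_nil]
  omega

def removeDefault (line : String) : String :=
  String.ofList (removeDefaultChars line.toList)

-- ===== PORT B =====
-- literal transliteration of Source B: truncate at '=', then one guarded rstrip of line[:-2]
def removeDefaultAltChars (l : List Char) : List Char :=
  if PySem.Chars.isIn pvPat l then l
  else
    let eq := PySem.Chars.find l ['=']
    let l1 := if eq ≠ -1 then PySem.List.slice l none (some eq) ++ [';'] else l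
    if PySem.Chars.isIn [';'] l1 && decide (1 < l1.length)
        && (PySem.List.pyGet? l1 (-2)).elim false PySem.Chars.isspace then
      PySem.Chars.rstrip (PySem.List.slice l1 none (some (-2))) ++ [';']
    else l1

def removeDefault_alt (line : String) : String :=
  String.ofList (removeDefaultAltChars line.toList)

-- ===== PRECONDITION & SPEC =====
-- is the line "whitespace* ';'" (the shape on which Python A's line[-2] raises IndexError)?
def pvWsSemiB (l : List Char) : Bool :=
  (l.getLast? == some ';') && l.dropLast.all PySem.Chars.isspace

-- Pre_ excludes exactly the inputs on which Python A raises IndexError: lines that, after the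
-- '='-truncation, consist of whitespace followed by a single final ';' (A evaluates line[-2] there).
def Pre_removeDefault (line : String) : Prop :=
  PySem.Str.isIn "@ApiModelProperty" line = true ∨ pvWsSemiB (pvTrunc line.toList) = false
instance (line : String) : Decidable (Pre_removeDefault line) := by
  unfold Pre_removeDefault; infer_instance

def pvWitness_removeDefault : String := "int x = 3 ;"

def Spec_removeDefault (line : String) (out : String) : Prop := out = removeDefault_alt line
instance (line : String) (out : String) : Decidable (Spec_removeDefault line out) := by
  unfold Spec_removeDefault; infer_instance

-- ===== CLAIM (what is proved, stated in full; the proofs are below) =====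
def Claim_equal_removeDefault : Prop :=
  ∀ (line : String), Dom_removeDefault line → Pre_removeDefault line →
    Spec_removeDefault line (removeDefault line)

-- ===== LEMMAS AND PROOFS =====
lemma ws_semi_false : PySem.Chars.isspace ';' = false := by decide
lemma pat_semi : ';' ∉ pvPat := by decide

lemma infix_of_infix_concat {sub l : List Char} {x : Char}
    (h : sub <:+: l ++ [x]) (hx : x ∉ sub) : sub <:+: l := by
  rcases List.infix_concat_iff.mp h with hsuf | hinf
  · rcases eq_or_ne sub [] with rfl | hne
    · exact List.nil_infix
    · exfalso
      obtain ⟨t, ht⟩ := hsuf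
      have hlast : sub.getLast? = some x := by
        have h1 : (t ++ sub).getLast? = (l ++ [x]).getLast? := by rw [ht]
        rcases List.exists_cons_of_ne_nil hne with ⟨a, as, rfl⟩
        simpa [List.getLast?_append] using h1
      exact hx (List.mem_of_getLast? hlast)
  · exact hinf

lemma pat_notin_concat_semi {l : List Char}
    (h : PySem.Chars.isIn pvPat l = false) :
    PySem.Chars.isIn pvPat (l ++ [';']) = false := by
  rw [PySem.Chars.isIn_eq_false_iff] at h ⊢
  intro hinf
  exact h (infix_of_infix_concat hinf pat_semi)

lemma pat_notin_take {l : List Char} (n : Nat)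
    (h : PySem.Chars.isIn pvPat l = false) :
    PySem.Chars.isIn pvPat (l.take n) = false := by
  rw [PySem.Chars.isIn_eq_false_iff] at h ⊢
  intro hinf
  exact h (hinf.trans (List.take_prefix n l).isInfix)

lemma pat_notin_trunc (l : List Char)
    (h : PySem.Chars.isIn pvPat l = false) :
    PySem.Chars.isIn pvPat (pvTrunc l) = false := by
  unfold pvTrunc
  split_ifs with hf
  · have h0 : 0 ≤ PySem.Chars.find l ['='] := by omega
    rw [PySem.List.slice_to _ h0]
    exact pat_notin_concat_semi (pat_notin_take _ h)
  · exact h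

lemma eq_notin_trunc (l : List Char) : '=' ∉ pvTrunc l := by
  unfold pvTrunc
  split_ifs with hf
  · have h0 : 0 ≤ PySem.Chars.find l ['='] := by omega
    have hspec := PySem.Chars.find_spec (s := l) (sub := ['=']) h0
    rw [PySem.List.slice_to _ h0]
    intro hmem
    rcases List.mem_append.mp hmem with hmem | hmem
    · obtain ⟨i, hi, hig⟩ := List.mem_iff_getElem.mp hmem
      have hi2 : (i : Int) < PySem.Chars.find l ['='] ∧ i < l.length := by
        simpa [List.length_take, lt_min_iff] using hi
      have hilen : i < l.length := hi2.2
      have hitn : i < (PySem.Chars.find l ['=']).toNat := by omega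
      have hpre : ['='] <+: l.drop i := by
        refine ⟨l.drop (i+1), ?_⟩
        rw [List.drop_eq_getElem_cons hilen]
        simp only [List.getElem_take] at hig
        simp [hig]
      exact hspec.2 i hitn hpre
    · simp at hmem
  · intro hmem
    have : PySem.Chars.find l ['='] = -1 := by
      have := PySem.Chars.neg_one_le_find l ['=']
      omega
    rw [PySem.Chars.find_eq_neg_one_iff] at this
    exact this ((List.singleton_infix_iff _ _).mpr hmem)

lemma trunc_of_not_mem {l : List Char} (h : '=' ∉ l) : pvTrunc l = l := by
  unfold pvTrunc
  have hf : PySem.Chars.find l ['='] = -1 := by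
    rw [PySem.Chars.find_eq_neg_one_iff]
    intro hinf
    exact h ((List.singleton_infix_iff _ _).mp hinf)
  simp [hf]

lemma rstrip_concat (q : List Char) (c : Char) :
    PySem.Chars.rstrip (q ++ [c]) =
      if PySem.Chars.isspace c then PySem.Chars.rstrip q else q ++ [c] := by
  simp only [PySem.Chars.rstrip, List.reverse_append, List.reverse_cons, List.reverse_nil,
    List.nil_append, List.singleton_append, List.dropWhile_cons]
  split_ifs with h <;> simp

lemma pyIdx_neg2 (n : Nat) (h : 2 ≤ n) :
    PySem.List.pyIdx? n (-2) = some (n - 2) := by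
  have h0 : ¬ ((0:Int) ≤ -2) := by omega
  have h1 : -(n : Int) ≤ -2 := by omega
  simp only [PySem.List.pyIdx?, h0, if_false, h1, if_true]
  exact congrArg some (by omega)

lemma pyGet_neg2_append (q : List Char) (c d : Char) :
    PySem.List.pyGet? (q ++ [c, d]) (-2) = some c := by
  unfold PySem.List.pyGet?
  rw [show (q ++ [c, d]).length = q.length + 2 from by simp,
    pyIdx_neg2 _ (by omega)]
  have h2 : q.length + 2 - 2 = q.length := by omega
  rw [h2, Option.bind_some, List.getElem?_append_right (le_refl q.length)]
  simp

lemma find_semi_pos {p : List Char} (h : ';' ∈ p) :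
    PySem.Chars.find p [';'] > -1 := by
  have := (PySem.Chars.find_nonneg_iff p [';']).mpr ((List.singleton_infix_iff _ _).mpr h)
  omega

-- the stripping loop: on p ++ [';'] with a non-space char in p, A's recursion computes rstrip p ++ [';']
lemma loopEq (p : List Char)
    (h1 : PySem.Chars.isIn pvPat (p ++ [';']) = false)
    (h2 : '=' ∉ p)
    (h3 : ∃ c ∈ p, PySem.Chars.isspace c = false) :
    removeDefaultChars (p ++ [';']) = PySem.Chars.rstrip p ++ [';'] := by
  induction p using List.reverseRecOn with
  | nil =>
    obtain ⟨c, hc, _⟩ := h3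
    simp at hc
  | append_singleton q c ih =>
    have h2' : '=' ∉ q := fun hq => h2 (List.mem_append.mpr (Or.inl hq))
    have hne : '=' ∉ (q ++ [c]) ++ [';'] := by
      intro hmem
      rcases List.mem_append.mp hmem with hmem | hmem
      · exact h2 hmem
      · simp at hmem
    have htr : pvTrunc ((q ++ [c]) ++ [';']) = (q ++ [c]) ++ [';'] := trunc_of_not_mem hne
    have hfind : PySem.Chars.find ((q ++ [c]) ++ [';']) [';'] > -1 :=
      find_semi_pos (by simp)
    have hget : PySem.List.pyGet? ((q ++ [c]) ++ [';']) (-2) = some c := by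
      rw [List.append_assoc]
      exact pyGet_neg2_append q c ';'
    rw [removeDefaultChars.eq_def]
    cases hx : PySem.List.pyGet? (pvTrunc ((q ++ [c]) ++ [';'])) (-2) with
    | none =>
      rw [htr, hget] at hx
      exact absurd hx (by simp)
    | some c' =>
      rw [htr, hget] at hx
      injection hx with hx'
      subst hx'
      rw [htr, if_pos h1, if_pos hfind]
      cases hsp : PySem.Chars.isspace c with
      | false =>
        simp only [Bool.false_eq_true, if_false, rstrip_concat, hsp]
      | true =>
        simp only [if_true]
        have hslice : PySem.List.slice ((q ++ [c]) ++ [';']) none (some (-2)) = q := by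
          rw [slice_neg2]
          have hl2 : ((q ++ [c]) ++ [';']).length - 2 = q.length := by simp
          rw [hl2, List.append_assoc]
          exact List.take_left' rfl
        rw [hslice]
        have h1' : PySem.Chars.isIn pvPat (q ++ [';']) = false := by
          rw [PySem.Chars.isIn_eq_false_iff] at h1 ⊢
          intro hi
          refine h1 ?_
          have hqi : pvPat <:+: q := infix_of_infix_concat hi pat_semi
          exact hqi.trans ((List.prefix_append q ([c] ++ [';'])).isInfix.trans
            (by rw [← List.append_assoc]))
        have h3' : ∃ x ∈ q, PySem.Chars.isspace x = false := by
          obtain ⟨x, hxm, hxs⟩ := h3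
          rcases List.mem_append.mp hxm with hxm | hxm
          · exact ⟨x, hxm, hxs⟩
          · simp at hxm
            subst hxm
            rw [hsp] at hxs
            exact absurd hxs (by simp)
        rw [ih h1' h2' h3', rstrip_concat, hsp]
        simp

lemma mainChars (l : List Char)
    (hpre : PySem.Chars.isIn pvPat l = true ∨ pvWsSemiB (pvTrunc l) = false) :
    removeDefaultChars l = removeDefaultAltChars l := by
  cases hin : PySem.Chars.isIn pvPat l with
  | true =>
    rw [removeDefaultChars.eq_def]
    unfold removeDefaultAltChars
    simp [hin]
  | false =>
    have hB1 : (if PySem.Chars.find l ['='] ≠ -1 then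
        PySem.List.slice l none (some (PySem.Chars.find l ['='])) ++ [';'] else l) = pvTrunc l := by
      unfold pvTrunc
      have hge := PySem.Chars.neg_one_le_find l ['=']
      by_cases hf : PySem.Chars.find l ['='] = -1
      · simp [hf]
      · simp only [hf, ne_eq, not_false_eq_true, if_true]
        rw [if_pos (by omega)]
    rw [removeDefaultChars.eq_def]
    unfold removeDefaultAltChars
    simp only [hin, Bool.false_eq_true, if_false, if_true, hB1]
    by_cases hsemi : PySem.Chars.find (pvTrunc l) [';'] = -1
    · have hnotin : PySem.Chars.isIn [';'] (pvTrunc l) = false := by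
        rw [PySem.Chars.isIn_eq_false_iff, ← PySem.Chars.find_eq_neg_one_iff]
        exact hsemi
      simp [hsemi, hnotin]
    · have hge := PySem.Chars.neg_one_le_find (pvTrunc l) [';']
      have hgt : PySem.Chars.find (pvTrunc l) [';'] > -1 := by omega
      have hmem : ';' ∈ pvTrunc l :=
        (List.singleton_infix_iff _ _).mp
          ((PySem.Chars.find_nonneg_iff _ _).mp (by omega))
      have hisin : PySem.Chars.isIn [';'] (pvTrunc l) = true :=
        (PySem.Chars.isIn_iff_infix _ _).mpr ((List.singleton_infix_iff _ _).mpr hmem)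
      cases hg : PySem.List.pyGet? (pvTrunc l) (-2) with
      | none =>
        simp [hgt, hg, hisin]
      | some c =>
        cases hsp : PySem.Chars.isspace c with
        | false =>
          simp [hgt, hg, hisin, hsp]
        | true =>
          have hlen2 : 2 ≤ (pvTrunc l).length := pyGet_neg2_some_len hg
          have hlen1 : (1:Nat) < (pvTrunc l).length := by omega
          simp only [hgt, if_pos, hg, hsp, if_true, hisin, Option.elim,
            decide_eq_true_eq, hlen1, decide_true, Bool.and_true, Bool.true_and]
          -- both sides now go through q := (pvTrunc l).take ((pvTrunc l).length - 2)
          rw [slice_neg2]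
          set t := pvTrunc l with ht
          set q := t.take (t.length - 2) with hq
          have hpt : PySem.Chars.isIn pvPat t = false := pat_notin_trunc l hin
          have h1' : PySem.Chars.isIn pvPat (q ++ [';']) = false := by
            rw [PySem.Chars.isIn_eq_false_iff] at hpt ⊢
            intro hi
            exact hpt ((infix_of_infix_concat hi pat_semi).trans
              (List.take_prefix _ t).isInfix)
          have h2' : '=' ∉ q := by
            intro hmm
            exact eq_notin_trunc l (List.take_subset _ _ hmm)
          have h3' : ∃ x ∈ q, PySem.Chars.isspace x = false := by
            by_contra hall
            push_neg at hall
            have hallws : ∀ x ∈ q, PySem.Chars.isspace x = true := by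
              intro x hx
              have := hall x hx
              revert this
              cases PySem.Chars.isspace x <;> simp
            -- decompose t = q ++ [c, d]; since everything before the last char is whitespace
            -- and ';' ∈ t, the last char is ';', so pvWsSemiB t = true, contradicting hpre
            have hdec : q ++ t.drop (t.length - 2) = t := List.take_append_drop _ _
            have hrlen : (t.drop (t.length - 2)).length = 2 := by
              simp [List.length_drop]; omega
            obtain ⟨a, b, hab⟩ : ∃ a b, t.drop (t.length - 2) = [a, b] := by
              rcases hr : t.drop (t.length - 2) with _ | ⟨a, _ | ⟨b, _ | ⟨e, rest⟩⟩⟩ <;>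
                simp [hr] at hrlen
              · exact ⟨a, b, rfl⟩
            have htqab : t = q ++ [a, b] := by rw [← hdec, hab]
            have hac : a = c := by
              have := pyGet_neg2_append q a b
              rw [← htqab, hg] at this
              exact (Option.some_injective _ this).symm
            have hbsemi : b = ';' := by
              rw [htqab] at hmem
              rcases List.mem_append.mp hmem with hmm | hmm
              · exact absurd (hallws _ hmm) (by simp [ws_semi_false])
              · simp only [List.mem_cons, List.not_mem_nil, or_false] at hmm
                rcases hmm with hmm | hmm
                · exfalso
                  rw [hac] at hmm
                  rw [← hmm] at hsp
                  exact absurd hsp (by rw [ws_semi_false]; simp)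
                · exact hmm.symm
            have hws : pvWsSemiB t = true := by
              unfold pvWsSemiB
              rw [htqab, hac, hbsemi]
              have hshape : q ++ [c, ';'] = (q ++ [c]) ++ [';'] := by simp
              rw [hshape]
              simp only [List.getLast?_concat, List.dropLast_concat, beq_self_eq_true,
                Bool.true_and, List.all_eq_true]
              intro x hx
              rcases List.mem_append.mp hx with hx | hx
              · exact hallws x hx
              · simp at hx; subst hx; exact hsp
            rcases hpre with hpre | hpre
            · rw [hin] at hpre; exact absurd hpre (by simp)
            · rw [hws] at hpre
              exact absurd hpre (by simp)
          exact loopEq q h1' h2' h3'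

-- ===== VERDICT (by name: the statement is the Claim_ definition above) =====
theorem removeDefault_spec : Claim_equal_removeDefault := by
  intro line _ hpre
  unfold Spec_removeDefault removeDefault removeDefault_alt
  refine congrArg String.ofList (mainChars line.toList ?_)
  unfold Pre_removeDefault at hpre
  rcases hpre with hpre | hpre
  · left
    rw [PySem.Str.isIn_eq] at hpre
    exact hpre
  · right
    exact hpre
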